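-- pv_equiv track=rewrite | github.com/anassohail99/Compiler-Construction | lexer.py | combine_string
-- ===== SOURCE A (Python) =====
-- def combine_string(code_set):
--     for k,v in code_set.items():
--         for index,words in enumerate(v):
--             string = ''
--             #if word start from $$$ means its our start of string
--             if words[0:3] == '$$$':
--                 string += words[3:]
--                 new_index = index
--                 iteration = 0
--                 #run loop until we find the end of string
--                 while(True):
--                     new_index +=1
--                     iteration +=1
--                     words = v[new_index]
--                     #if we get $$$ in the end means it is the last piece of our string
--                     if(words[len(words)-3:len(words)] == '$$$'):
--                         string += words[:len(words)-3]
--                         string = string[1:len(string)-1].replace('\\\\','\\')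
--                         break
--                     #if not then add the words to combine string
--                     else:
--                         #if words=='':
--                             #string += ' '
--                         string += words
--                 #delete the words from word list that are the parts of string
--                 for x in range(iteration):
--                     del code_set[k][index+1]
--                 code_set[k][index] = string
--     return code_set
-- ===== SOURCE B (Python) =====
-- def combine_string(code_set):
--     # Single forward merge pass per value list: build the new list once, no
--     # mutation-during-iteration, no del loop.  (Return-value equivalence; like A,
--     # the inner lists are updated in place.)
--     for v in code_set.values():
--         out = []
--         i = 0
--         n = len(v)
--         while i < n:
--             w = v[i]
--             if w.startswith('$$$'):
--                 s = w[3:]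
--                 j = i + 1
--                 while not v[j].endswith('$$$'):
--                     s += v[j]
--                     j += 1
--                 s += v[j][:-3]
--                 out.append(s[1:-1].replace('\\\\', '\\'))
--                 i = j + 1
--             else:
--                 out.append(w)
--                 i += 1
--         v[:] = out
--     return code_set
-- ===== Notes on version B (the rewrite author's own statement) =====
-- stated objective: simpler
-- what changed: A's enumerate-over-a-list-it-mutates with a while(True) reader and a del-loop that repeatedly deletes at index+1 is replaced by one flat forward pass per value list that builds the merged list once and assigns it back with v[:] = out.
import Mathlib
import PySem

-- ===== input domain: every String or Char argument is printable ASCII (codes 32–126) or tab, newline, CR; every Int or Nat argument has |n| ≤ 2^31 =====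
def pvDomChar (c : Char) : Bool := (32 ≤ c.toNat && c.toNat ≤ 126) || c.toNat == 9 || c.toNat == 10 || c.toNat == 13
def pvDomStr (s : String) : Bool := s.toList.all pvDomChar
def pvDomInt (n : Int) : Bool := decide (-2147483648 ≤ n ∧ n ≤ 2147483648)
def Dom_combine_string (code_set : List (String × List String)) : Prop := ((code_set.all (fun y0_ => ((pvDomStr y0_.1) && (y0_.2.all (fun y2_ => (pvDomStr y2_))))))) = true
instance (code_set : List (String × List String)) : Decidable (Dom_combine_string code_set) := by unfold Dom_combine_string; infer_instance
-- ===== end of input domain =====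

-- B replaces A's enumerate-over-a-mutating-list + while(True) + del-loop with one
-- forward merge pass per value list that builds the new list once (objective: simpler).
-- Like A, the Python B updates the inner lists in place; equivalence here is about the return value.

-- ===== PORT A =====
-- 'del code_set[k][index+1]' once: remove the element at that position
def pvDelOnce (v : List String) (pos : Nat) : List String := v.take pos ++ v.drop (pos + 1)

-- 'for x in range(iteration): del code_set[k][index+1]'
def pvDelRange (v : List String) (pos : Nat) : Nat → List String
  | 0 => v
  | n + 1 => pvDelRange (pvDelOnce v pos) pos n

-- termination facts for the ports (cited in decreasing_by)
theorem pvDelOnce_length_le (v : List String) (pos : Nat) : (pvDelOnce v pos).length ≤ v.length := by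
  simp [pvDelOnce]; omega

theorem pvDelRange_length_le (v : List String) (pos n : Nat) : (pvDelRange v pos n).length ≤ v.length := by
  induction n generalizing v with
  | zero => simp [pvDelRange]
  | succ n ih => exact le_trans (ih (pvDelOnce v pos)) (pvDelOnce_length_le v pos)

-- A's 'while(True)': increment new_index/iteration, read words = v[new_index]
-- (IndexError out of range = none here), stop on a '$$$'-terminated piece.
def pvWhileA (v : List String) (string : String) (new_index iteration : Nat) : Option (String × Nat) :=
  if h : new_index + 1 < v.length then
    let words := v[new_index + 1]
    if PySem.Str.slice words (some (PySem.Str.len words - 3)) (some (PySem.Str.len words)) == "$$$" then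
      let string := string ++ PySem.Str.slice words none (some (PySem.Str.len words - 3))
      some (PySem.Str.replace (PySem.Str.slice string (some 1) (some (PySem.Str.len string - 1))) "\\\\" "\\",
            iteration + 1)
    else pvWhileA v (string ++ words) (new_index + 1) (iteration + 1)
  else none
  termination_by v.length - new_index
  decreasing_by omega

-- A's 'for index,words in enumerate(v)' with v mutated during iteration:
-- Python's iterator reads position index of the CURRENT list while index < len(v).
def pvInnerA (v : List String) (index : Nat) : List String :=
  if h : index < v.length then
    let words := v[index]
    if PySem.Str.slice words (some 0) (some 3) == "$$$" then
      match pvWhileA v ("" ++ PySem.Str.slice words (some 3) none) index 0 with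
      | none => v  -- Python raises IndexError here (excluded by Pre_)
      | some (string, iteration) =>
          pvInnerA ((pvDelRange v (index + 1) iteration).set index string) (index + 1)
    else pvInnerA v (index + 1)
  else v
  termination_by v.length - index
  decreasing_by
  · have := pvDelRange_length_le v (index + 1) iteration
    simp only [List.length_set]; omega
  · omega

-- 'for k,v in code_set.items(): …; return code_set': A mutates each value list in
-- place; dict keys are distinct in Python, so this is exactly a map over the entries.
def combine_string (code_set : List (String × List String)) : List (String × List String) :=
  code_set.map (fun kv => (kv.1, pvInnerA kv.2 0))

-- ===== PORT B =====
-- Source B's inner 'while not v[j].endswith(...)': accumulate pieces into s until the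
-- terminator; returns (combined raw string, remainder after the terminator);
-- none = Python's IndexError when j runs off the end (excluded by Pre_).
def pvScanB (u : List String) (s : String) : Option (String × List String) :=
  match u with
  | [] => none
  | w :: rest =>
    if PySem.Str.endswith w "$$$" then some (s ++ PySem.Str.slice w none (some (-3)), rest)
    else pvScanB rest (s ++ w)

-- termination fact for pvMergeB (cited in decreasing_by)
theorem pvScanB_length : ∀ {u : List String} {s t : String} {rest' : List String},
    pvScanB u s = some (t, rest') → rest' <:+ u ∧ rest'.length < u.length := by
  intro u
  induction u with
  | nil => intro s t rest' h; simp [pvScanB] at h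
  | cons w rest ih =>
    intro s t rest' h
    simp only [pvScanB] at h
    split at h
    · simp only [Option.some.injEq, Prod.mk.injEq] at h
      obtain ⟨-, rfl⟩ := h
      exact ⟨List.suffix_cons _ _, by simp⟩
    · obtain ⟨hs, hl⟩ := ih h
      exact ⟨hs.trans (List.suffix_cons _ _), by simp; omega⟩

-- Source B's outer 'while i < len(v)' building the new list out: cons = append to out,
-- a '$$$' opener hands the rest to pvScanB and resumes after the span.
def pvMergeB (v : List String) : List String :=
  match v with
  | [] => []
  | w :: rest =>
    if PySem.Str.startswith w "$$$" then
      match h : pvScanB rest (PySem.Str.slice w (some 3) none) with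
      | none => w :: rest  -- Python raises IndexError here (excluded by Pre_)
      | some (s, rest') =>
          PySem.Str.replace (PySem.Str.slice s (some 1) (some (-1))) "\\\\" "\\" :: pvMergeB rest'
    else w :: pvMergeB rest
  termination_by v.length
  decreasing_by
  · have := (pvScanB_length h).2; simp; omega
  · simp

-- 'for v in code_set.values(): …; v[:] = out; return code_set' = a map over the entries.
def combine_string_alt (code_set : List (String × List String)) : List (String × List String) :=
  code_set.map (fun kv => (kv.1, pvMergeB kv.2))

-- ===== PRECONDITION & SPEC =====
-- grammar check for Pre_: one pass, tracking whether we are inside a '$$$' string run;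
-- 'inside' ends when a piece ends with '$$$'; a list ending while inside is ill-formed
def pvWFAux : List String → Bool → Bool
  | [], inside => !inside
  | w :: rest, true => pvWFAux rest (!PySem.Str.endswith w "$$$")
  | w :: rest, false => pvWFAux rest (PySem.Str.startswith w "$$$")

-- Pre_ excludes exactly the inputs on which Python A raises IndexError (an
-- unterminated '$$$' string run); Python B raises there as well.
def Pre_combine_string (code_set : List (String × List String)) : Prop :=
  (code_set.all (fun kv => pvWFAux kv.2 false)) = true
instance (code_set : List (String × List String)) : Decidable (Pre_combine_string code_set) := by
  unfold Pre_combine_string; infer_instance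

def pvWitness_combine_string : (List (String × List String)) :=
  [("k", ["$$$\"a", "b\"$$$", "x"])]

def Spec_combine_string (code_set : List (String × List String)) (out : List (String × List String)) : Prop := out = combine_string_alt code_set
instance (code_set : List (String × List String)) (out : List (String × List String)) : Decidable (Spec_combine_string code_set out) := by unfold Spec_combine_string; infer_instance

-- ===== CLAIM (what is proved, stated in full; the proofs are below) =====
def Claim_equal_combine_string : Prop := ∀ (code_set : List (String × List String)), Dom_combine_string code_set → Pre_combine_string code_set → Spec_combine_string code_set (combine_string code_set)

-- ===== LEMMAS AND PROOFS =====
-- A's opener test w[0:3] == '$$$' is w.startswith('$$$')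
theorem pv_start_eq (w : String) :
    (PySem.Str.slice w (some 0) (some 3) == "$$$") = PySem.Str.startswith w "$$$" := by
  have hp : ("$$$" : String).toList = ['$', '$', '$'] := rfl
  rw [Bool.eq_iff_iff, beq_iff_eq, ← String.toList_inj, PySem.Str.toList_slice,
      PySem.Chars.slice_eq_listSlice, PySem.Str.startswith_eq, PySem.Chars.startswith_iff, hp]
  rw [show (0 : Int) = ((0 : Nat) : Int) from rfl, show (3 : Int) = ((3 : Nat) : Int) from rfl,
      PySem.List.slice_natCast]
  rw [List.prefix_iff_eq_take]
  simp [eq_comm]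

-- A's terminator test w[len(w)-3:len(w)] == '$$$' is w.endswith('$$$')
theorem pv_end_eq (w : String) :
    (PySem.Str.slice w (some (PySem.Str.len w - 3)) (some (PySem.Str.len w)) == "$$$") = PySem.Str.endswith w "$$$" := by
  have hp : ("$$$" : String).toList = ['$', '$', '$'] := rfl
  rw [Bool.eq_iff_iff, beq_iff_eq, ← String.toList_inj, PySem.Str.toList_slice,
      PySem.Chars.slice_eq_listSlice, PySem.Str.endswith_eq, PySem.Chars.endswith_iff,
      PySem.Str.len_eq, hp]
  by_cases h3 : 3 ≤ w.toList.length
  · rw [show ((w.toList.length : Int) - 3) = ((w.toList.length - 3 : Nat) : Int) by omega,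
        PySem.List.slice_natCast, List.suffix_iff_eq_drop]
    rw [List.take_of_length_le (by simp)]
    simp [eq_comm]
  · constructor
    · intro hEq
      have hcl := PySem.List.clampIdx_le w.toList.length ((w.toList.length : Int))
      have hl := congrArg List.length hEq
      rw [PySem.List.length_slice] at hl
      simp only [List.length_cons, List.length_nil] at hl
      omega
    · intro h
      have := h.length_le
      simp only [List.length_cons, List.length_nil] at this
      omega

-- on a '$$$'-terminated piece, w[:len(w)-3] = w[:-3]
theorem pv_cut_eq (w : String) (h : PySem.Str.endswith w "$$$" = true) :
    PySem.Str.slice w none (some (PySem.Str.len w - 3)) = PySem.Str.slice w none (some (-3)) := by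
  have h3 : 3 ≤ w.toList.length := by
    rw [PySem.Str.endswith_eq, PySem.Chars.endswith_iff] at h
    have := h.length_le
    simpa using this
  rw [← String.toList_inj, PySem.Str.toList_slice, PySem.Str.toList_slice,
      PySem.Chars.slice_eq_listSlice, PySem.Chars.slice_eq_listSlice, PySem.Str.len_eq]
  rw [show ((w.toList.length : Int) - 3) = ((w.toList.length - 3 : Nat) : Int) by omega,
      PySem.List.slice_to_natCast, PySem.List.slice_to_neg_ofNat w.toList 3 (by norm_num)]

-- s[1:len(s)-1] = s[1:-1]
theorem pv_trim_eq (s : String) :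
    PySem.Str.slice s (some 1) (some (PySem.Str.len s - 1)) = PySem.Str.slice s (some 1) (some (-1)) := by
  rw [← String.toList_inj, PySem.Str.toList_slice, PySem.Str.toList_slice,
      PySem.Chars.slice_eq_listSlice, PySem.Chars.slice_eq_listSlice, PySem.Str.len_eq]
  have hc : PySem.List.clampIdx s.toList.length ((s.toList.length : Int) - 1)
      = PySem.List.clampIdx s.toList.length (-1) := by
    simp only [PySem.List.clampIdx]
    split_ifs <;> omega
  simp only [PySem.List.slice, hc]

-- unfolding equations of pvMergeB (its match carries an equation binder, so split them out once)
theorem pvMergeB_cons_false (w : String) (rest : List String)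
    (hw : ¬ PySem.Str.startswith w "$$$" = true) :
    pvMergeB (w :: rest) = w :: pvMergeB rest := by
  rw [pvMergeB, if_neg hw]

theorem pvMergeB_cons_none (w : String) (rest : List String)
    (hw : PySem.Str.startswith w "$$$" = true)
    (hsc : pvScanB rest (PySem.Str.slice w (some 3) none) = none) :
    pvMergeB (w :: rest) = w :: rest := by
  rw [pvMergeB, if_pos hw]
  split <;> simp_all

theorem pvMergeB_cons_some (w : String) (rest : List String) (t : String) (rest' : List String)
    (hw : PySem.Str.startswith w "$$$" = true)
    (hsc : pvScanB rest (PySem.Str.slice w (some 3) none) = some (t, rest')) :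
    pvMergeB (w :: rest)
      = PySem.Str.replace (PySem.Str.slice t (some 1) (some (-1))) "\\\\" "\\" :: pvMergeB rest' := by
  rw [pvMergeB, if_pos hw]
  split <;> simp_all

-- A's inner while loop computes what pvScanB computes (plus A's final transform and the piece count)
theorem pvWhileA_eq (u : List String) : ∀ (front : List String) (s : String) (ni it : Nat),
    front.length = ni + 1 →
    pvWhileA (front ++ u) s ni it =
      (match pvScanB u s with
       | none => none
       | some (t, rest') =>
         some (PySem.Str.replace (PySem.Str.slice t (some 1) (some (PySem.Str.len t - 1))) "\\\\" "\\",
               it + (u.length - rest'.length))) := by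
  induction u with
  | nil =>
    intro front s ni it hf
    rw [pvWhileA]
    rw [dif_neg (by simp; omega)]
    simp [pvScanB]
  | cons x us ih =>
    intro front s ni it hf
    rw [pvWhileA]
    rw [dif_pos (by simp; omega)]
    simp only
    rw [List.getElem_of_append rfl hf]
    rw [pv_end_eq]
    by_cases he : PySem.Str.endswith x "$$$" = true
    · rw [if_pos he]
      rw [pv_cut_eq x he]
      have hstep : pvScanB (x :: us) s = some (s ++ PySem.Str.slice x none (some (-3)), us) := by
        rw [pvScanB, if_pos he]
      rw [hstep]
      have h2 : it + ((x :: us).length - us.length) = it + 1 := by simp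
      show some _ = some (PySem.Str.replace
          (PySem.Str.slice (s ++ PySem.Str.slice x none (some (-3))) (some 1)
            (some (PySem.Str.len (s ++ PySem.Str.slice x none (some (-3))) - 1)))
          "\\\\" "\\", it + ((x :: us).length - us.length))
      rw [h2]
    · rw [if_neg he]
      rw [List.append_cons front x us]
      rw [ih (front ++ [x]) (s ++ x) (ni + 1) (it + 1) (by simp [hf])]
      have hstep : pvScanB (x :: us) s = pvScanB us (s ++ x) := by
        rw [pvScanB, if_neg he]
      rw [hstep]
      cases hsc : pvScanB us (s ++ x) with
      | none => rfl
      | some p =>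
        obtain ⟨t, r'⟩ := p
        have hlen := (pvScanB_length hsc).2
        simp only [List.length_cons]
        congr 2
        omega

-- the deletions of A remove exactly the merged span
theorem pvDelRange_span (pre : List String) : ∀ (done : List String) (w : String) (rest' : List String),
    pvDelRange (done ++ w :: (pre ++ rest')) (done.length + 1) pre.length = done ++ w :: rest' := by
  induction pre with
  | nil => intro done w rest'; simp [pvDelRange]
  | cons p pre' ih =>
    intro done w rest'
    have hdel : pvDelOnce (done ++ w :: ((p :: pre') ++ rest')) (done.length + 1)
        = done ++ w :: (pre' ++ rest') := by
      unfold pvDelOnce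
      rw [show done ++ w :: ((p :: pre') ++ rest') = (done ++ [w]) ++ (p :: (pre' ++ rest')) from by simp,
          show done.length + 1 = (done ++ [w]).length from by simp]
      rw [List.take_left, List.drop_length_add_append 1]
      simp
    show pvDelRange (pvDelOnce (done ++ w :: ((p :: pre') ++ rest')) (done.length + 1)) (done.length + 1) pre'.length
        = done ++ w :: rest'
    rw [hdel]
    exact ih done w rest'

theorem pv_set_append (done : List String) (w s : String) (rest : List String) :
    (done ++ w :: rest).set done.length s = done ++ s :: rest := by
  induction done with
  | nil => simp
  | cons d ds ih => simp [ih]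

-- main induction: A's in-place scan from position done.length equals done ++ B's merge of the rest
theorem pvInnerA_eq_mergeB : ∀ (n : Nat) (todo : List String), todo.length ≤ n →
    ∀ (done : List String), pvInnerA (done ++ todo) done.length = done ++ pvMergeB todo := by
  intro n
  induction n with
  | zero =>
    intro todo h done
    have : todo = [] := by cases todo <;> simp_all
    subst this
    rw [pvInnerA, dif_neg (by simp)]
    simp [pvMergeB]
  | succ n ih =>
    intro todo h done
    cases todo with
    | nil =>
      rw [pvInnerA, dif_neg (by simp)]
      simp [pvMergeB]
    | cons w rest =>
      rw [pvInnerA, dif_pos (by simp)]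
      simp only
      rw [List.getElem_of_append rfl rfl]
      rw [pv_start_eq]
      by_cases hw : PySem.Str.startswith w "$$$" = true
      · rw [if_pos hw]
        rw [String.empty_append]
        rw [show done ++ w :: rest = (done ++ [w]) ++ rest from by simp]
        rw [pvWhileA_eq rest (done ++ [w]) _ done.length 0 (by simp)]
        rw [show (done ++ [w]) ++ rest = done ++ w :: rest from by simp]
        cases hsc : pvScanB rest (PySem.Str.slice w (some 3) none) with
        | none =>
          rw [pvMergeB_cons_none w rest hw hsc]
        | some p =>
          obtain ⟨t, r'⟩ := p
          obtain ⟨hsuf, hlt⟩ := pvScanB_length hsc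
          obtain ⟨pre, hpre⟩ := hsuf
          rw [pvMergeB_cons_some w rest t r' hw hsc]
          simp only
          rw [← hpre]
          have hit : 0 + ((pre ++ r').length - r'.length) = pre.length := by simp
          rw [hit]
          rw [pvDelRange_span pre done w r']
          rw [pv_set_append]
          rw [show done ++ (PySem.Str.replace (PySem.Str.slice t (some 1) (some (PySem.Str.len t - 1))) "\\\\" "\\") :: r'
              = (done ++ [PySem.Str.replace (PySem.Str.slice t (some 1) (some (PySem.Str.len t - 1))) "\\\\" "\\"]) ++ r' from by simp]
          rw [show done.length + 1 = (done ++ [PySem.Str.replace (PySem.Str.slice t (some 1) (some (PySem.Str.len t - 1))) "\\\\" "\\"]).length from by simp]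
          rw [ih r' (by rw [← hpre] at h; simp at h; omega) _]
          rw [pv_trim_eq]
          simp
      · rw [if_neg hw]
        rw [show done ++ w :: rest = (done ++ [w]) ++ rest from by simp]
        rw [show done.length + 1 = (done ++ [w]).length from by simp]
        rw [ih rest (by simp at h; omega) (done ++ [w])]
        rw [pvMergeB_cons_false w rest hw]
        simp

-- ===== VERDICT (by name: the statement is the Claim_ definition above) =====
theorem combine_string_spec : Claim_equal_combine_string := by
  intro code_set _dom _pre
  unfold Spec_combine_string combine_string combine_string_alt
  refine List.map_congr_left ?_
  intro kv _
  have := pvInnerA_eq_mergeB kv.2.length kv.2 le_rfl []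
  simpa using this
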